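-- pv_equiv track=rewrite | github.com/xiongchenyan/cxPyLib | cxBase/SimpleFeatureBase.py | MaxFeatureValue
-- ===== SOURCE A (Python) =====
-- def MaxFeatureValue(lFeature):
--     hMax = {}
--     for hFeature in lFeature:
--         for key,value in hFeature.items():
--             if not key in hMax:
--                 hMax[key] = value
--             else:
--                 hMax[key] = min(value,hMax[key])
--     return hMax
-- ===== SOURCE B (Python) =====
-- def MaxFeatureValue(lFeature):
--     # pass 1: collect every value under its key
--     index = {}
--     for hFeature in lFeature:
--         for key, value in hFeature.items():
--             index.setdefault(key, []).append(value)
--     # pass 2: reduce each bucket to its minimum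
--     return {key: min(values) for key, values in index.items()}
-- ===== Notes on version B (the rewrite author's own statement) =====
-- stated objective: alternative
-- what changed: Replaces A's interleaved running-minimum accumulation with a two-pass collect-then-reduce decomposition: first group all values per key into lists, then take min of each bucket in a separate comprehension.
import Mathlib
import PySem

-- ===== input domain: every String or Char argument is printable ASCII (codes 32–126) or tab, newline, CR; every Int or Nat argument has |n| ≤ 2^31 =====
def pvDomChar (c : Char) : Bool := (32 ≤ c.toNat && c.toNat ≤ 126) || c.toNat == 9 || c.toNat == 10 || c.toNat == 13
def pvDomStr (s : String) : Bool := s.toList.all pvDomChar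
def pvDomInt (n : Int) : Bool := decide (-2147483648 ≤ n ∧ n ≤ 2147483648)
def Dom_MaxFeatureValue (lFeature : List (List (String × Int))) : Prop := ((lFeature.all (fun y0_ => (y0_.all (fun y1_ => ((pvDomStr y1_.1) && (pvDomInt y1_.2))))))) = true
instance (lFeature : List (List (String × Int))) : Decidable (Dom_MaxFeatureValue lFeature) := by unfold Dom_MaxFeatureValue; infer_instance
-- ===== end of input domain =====

-- B replaces A's interleaved running-minimum accumulation with a two-pass collect-then-reduce
-- decomposition (group all values per key, then take each bucket's minimum); same cost ("alternative").


-- ===== PORT A =====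
-- 'if not key in hMax: hMax[key] = value else: hMax[key] = min(value, hMax[key])'
def stepA (hMax : PySem.Dict String Int) (kv : String × Int) : PySem.Dict String Int :=
  if hMax.contains kv.1 = false then hMax.insert kv.1 kv.2
  else hMax.insert kv.1 (min kv.2 (hMax.getD kv.1 0))

def MaxFeatureValue (lFeature : List (List (String × Int))) : List (String × Int) :=
  (lFeature.foldl (fun hMax hFeature => hFeature.foldl stepA hMax) PySem.Dict.empty).items

-- ===== PORT B =====
-- min(values) on a nonempty Python list (buckets built below are never empty)
def pyMinList (vs : List Int) : Int :=
  match vs with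
  | [] => 0
  | h :: t => t.foldl min h

-- 'index.setdefault(key, []).append(value)'
def stepB (idx : PySem.Dict String (List Int)) (kv : String × Int) : PySem.Dict String (List Int) :=
  idx.modify kv.1 [] (· ++ [kv.2])

def MaxFeatureValue_alt (lFeature : List (List (String × Int))) : List (String × Int) :=
  let index := lFeature.foldl (fun idx hFeature => hFeature.foldl stepB idx) PySem.Dict.empty
  index.items.map (fun p => (p.1, pyMinList p.2))

-- ===== PRECONDITION & SPEC =====
def Spec_MaxFeatureValue (lFeature : List (List (String × Int))) (out : List (String × Int)) : Prop := out = MaxFeatureValue_alt lFeature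
instance (lFeature : List (List (String × Int))) (out : List (String × Int)) : Decidable (Spec_MaxFeatureValue lFeature out) := by unfold Spec_MaxFeatureValue; infer_instance

-- ===== CLAIM (what is proved, stated in full; the proofs are below) =====
def Claim_equal_MaxFeatureValue : Prop := ∀ (lFeature : List (List (String × Int))), Dom_MaxFeatureValue lFeature → Spec_MaxFeatureValue lFeature (MaxFeatureValue lFeature)

-- ===== LEMMAS AND PROOFS =====

-- Invariant relating A's running-min dict to B's bucket dict.
def RelMin (dA : PySem.Dict String Int) (dB : PySem.Dict String (List Int)) : Prop :=
  dA.items = dB.items.map (fun p => (p.1, pyMinList p.2)) ∧ dB.keys.Nodup ∧ ∀ p ∈ dB.items, p.2 ≠ []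

theorem keys_of_rel {dA : PySem.Dict String Int} {dB : PySem.Dict String (List Int)}
    (h : dA.items = dB.items.map (fun p => (p.1, pyMinList p.2))) : dA.keys = dB.keys := by
  simp only [PySem.Dict.keys, h, List.map_map]
  rfl

theorem pyMinList_append (vs : List Int) (hne : vs ≠ []) (v : Int) :
    pyMinList (vs ++ [v]) = min v (pyMinList vs) := by
  cases vs with
  | nil => exact absurd rfl hne
  | cons h t =>
    simp only [pyMinList, List.cons_append, List.foldl_append, List.foldl_cons, List.foldl_nil]
    exact min_comm _ v

theorem rel_step (dA : PySem.Dict String Int) (dB : PySem.Dict String (List Int))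
    (h : RelMin dA dB) (kv : String × Int) : RelMin (stepA dA kv) (stepB dB kv) := by
  obtain ⟨hitems, hnd, hne⟩ := h
  have hkeys : dA.keys = dB.keys := keys_of_rel hitems
  have hcont : dA.contains kv.1 = dB.contains kv.1 := by
    rw [PySem.Dict.contains_eq_decide_mem_keys, PySem.Dict.contains_eq_decide_mem_keys, hkeys]
  have hmod : stepB dB kv = dB.insert kv.1 (dB.getD kv.1 [] ++ [kv.2]) := rfl
  by_cases hc : dB.contains kv.1 = true
  · -- key present: A replaces with min, B appends to its bucket
    obtain ⟨vs, hget⟩ : ∃ vs, dB.get? kv.1 = some vs := by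
      have := PySem.Dict.contains_eq_isSome_get? dB kv.1
      rw [hc] at this
      exact Option.isSome_iff_exists.mp this.symm
    have hmem : (kv.1, vs) ∈ dB.items := PySem.Dict.mem_items_of_get?_eq_some dB hget
    have hvs : dB.getD kv.1 [] = vs := PySem.Dict.getD_of_mem_items dB hmem hnd []
    have hvsne : vs ≠ [] := hne _ hmem
    have hgetA : dA.getD kv.1 0 = pyMinList vs := by
      have : (kv.1, pyMinList vs) ∈ dA.items := by
        rw [hitems]; exact List.mem_map.mpr ⟨(kv.1, vs), hmem, rfl⟩
      exact PySem.Dict.getD_of_mem_items dA this (by rw [hkeys]; exact hnd) 0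
    have hAstep : stepA dA kv = dA.insert kv.1 (min kv.2 (dA.getD kv.1 0)) := by
      unfold stepA; rw [hcont, hc]; simp
    refine ⟨?_, ?_, ?_⟩
    · rw [hAstep, hmod,
        PySem.Dict.items_insert_of_contains dA _ (by rw [hcont]; exact hc),
        PySem.Dict.items_insert_of_contains dB _ hc, hitems, List.map_map, List.map_map]
      refine List.map_congr_left ?_
      intro p hp
      by_cases hpk : p.1 = kv.1
      · simp only [Function.comp, hpk, beq_self_eq_true, if_true]
        rw [hvs, hgetA, pyMinList_append vs hvsne kv.2]
      · simp only [Function.comp]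
        rw [if_neg (by simpa using hpk), if_neg (by simpa using hpk)]
    · rw [hmod]; exact PySem.Dict.nodup_keys_insert dB _ _ hnd
    · intro p hp
      rw [hmod, PySem.Dict.items_insert_of_contains dB _ hc] at hp
      obtain ⟨q, hq, hpq⟩ := List.mem_map.mp hp
      by_cases hqk : (q.1 == kv.1) = true
      · rw [if_pos hqk] at hpq
        subst hpq; simp [hvs]
      · rw [if_neg hqk] at hpq
        subst hpq; exact hne q hq
  · -- fresh key: both append a new entry
    have hc' : dB.contains kv.1 = false := by simpa using hc
    have hcA : dA.contains kv.1 = false := by rw [hcont]; exact hc'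
    have hAstep : stepA dA kv = dA.insert kv.1 kv.2 := by
      unfold stepA; rw [hcA]; simp
    have hgetB : dB.getD kv.1 [] = [] := PySem.Dict.getD_of_not_contains dB [] hc'
    refine ⟨?_, ?_, ?_⟩
    · rw [hAstep, hmod, hgetB,
        PySem.Dict.items_insert_of_not_contains dA _ hcA,
        PySem.Dict.items_insert_of_not_contains dB _ hc', hitems, List.map_append]
      rfl
    · rw [hmod]; exact PySem.Dict.nodup_keys_insert dB _ _ hnd
    · intro p hp
      rw [hmod, hgetB, PySem.Dict.items_insert_of_not_contains dB _ hc'] at hp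
      rcases List.mem_append.mp hp with h1 | h1
      · exact hne p h1
      · simp only [List.mem_singleton] at h1; subst h1; simp

theorem rel_foldl (l : List (String × Int)) (dA : PySem.Dict String Int)
    (dB : PySem.Dict String (List Int)) (h : RelMin dA dB) :
    RelMin (l.foldl stepA dA) (l.foldl stepB dB) := by
  induction l generalizing dA dB with
  | nil => exact h
  | cons kv t ih => exact ih _ _ (rel_step dA dB h kv)

theorem rel_foldl_outer (l : List (List (String × Int))) (dA : PySem.Dict String Int)
    (dB : PySem.Dict String (List Int)) (h : RelMin dA dB) :
    RelMin (l.foldl (fun d hF => hF.foldl stepA d) dA)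
           (l.foldl (fun d hF => hF.foldl stepB d) dB) := by
  induction l generalizing dA dB with
  | nil => exact h
  | cons hF t ih => exact ih _ _ (rel_foldl hF dA dB h)

-- ===== VERDICT (by name: the statement is the Claim_ definition above) =====
theorem MaxFeatureValue_spec : Claim_equal_MaxFeatureValue := by
  intro lFeature _
  unfold Spec_MaxFeatureValue MaxFeatureValue MaxFeatureValue_alt
  have h := rel_foldl_outer lFeature PySem.Dict.empty PySem.Dict.empty
    ⟨by simp [PySem.Dict.empty], by simp [PySem.Dict.keys_empty], by simp [PySem.Dict.empty]⟩
  exact h.1
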